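-- pv_equiv track=rewrite | github.com/geetu040/pricegram_search | utils.py | find_matching_parts
-- ===== SOURCE A (Python) =====
-- def find_matching_parts(input_string, substring):
-- 	matched_parts = []
-- 	start = 0
-- 	while start < len(substring):
-- 		found = False
-- 		for end in range(len(substring), start, -1):
-- 			if substring[start:end] in input_string:
-- 				matched_parts.append(substring[start:end])
-- 				start = end
-- 				found = True
-- 				break
-- 		if not found:
-- 			start += 1
-- 		if start >= len(substring):
-- 			break
-- 	return matched_parts
-- ===== SOURCE B (Python) =====
-- def find_matching_parts(input_string, substring):
--     # Two staged passes: (1) a two-pointer sweep computes, for every start s,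
--     # the length L[s] of the longest piece substring[s:e] contained in
--     # input_string (the pointer e never moves back, because containment of a
--     # slice is closed under dropping its first character); (2) a greedy walk
--     # over L emits the pieces and jumps.
--     n = len(substring)
--     L = []
--     e = 0
--     for s in range(n):
--         if e < s:
--             e = s
--         while e < n and substring[s:e + 1] in input_string:
--             e += 1
--         L.append(e - s)
--     parts = []
--     s = 0
--     while s < n:
--         if L[s] > 0:
--             parts.append(substring[s:s + L[s]])
--             s += L[s]
--         else:
--             s += 1
--     return parts
-- ===== Notes on version B (the rewrite author's own statement) =====
-- stated objective: faster
-- what changed: A interleaves matching and emission: at each position it rescans candidate end positions downward from len(substring); B is two staged passes: a two-pointer sweep that computes the longest-match length at every start (the right pointer never moves back, since slice containment is closed under dropping the first character) into an array L, then a separate greedy walk over L that emits the pieces and jumps.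
import Mathlib
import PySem

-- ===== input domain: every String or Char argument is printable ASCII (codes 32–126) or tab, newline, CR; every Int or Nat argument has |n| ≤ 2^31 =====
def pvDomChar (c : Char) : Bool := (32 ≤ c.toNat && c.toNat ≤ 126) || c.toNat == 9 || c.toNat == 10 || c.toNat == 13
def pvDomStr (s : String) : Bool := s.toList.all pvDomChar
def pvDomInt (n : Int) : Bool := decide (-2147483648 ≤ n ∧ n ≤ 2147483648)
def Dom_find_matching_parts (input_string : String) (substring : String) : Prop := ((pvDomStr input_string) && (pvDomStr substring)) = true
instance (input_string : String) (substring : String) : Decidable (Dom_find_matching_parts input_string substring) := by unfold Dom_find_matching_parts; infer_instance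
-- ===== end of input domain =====

-- B replaces A's interleaved downward rescans by two staged passes — a two-pointer
-- sweep computing all longest-match lengths, then a greedy walk over that table;
-- objective: faster (far fewer containment tests).

-- ===== PORT A =====
-- inner 'for end in range(len(substring), start, -1)': counts k = end - start down from len - start;
-- substring[start:end] is PySem.List.slice on toList
def pvAScan (inp sub : List Char) (start : Nat) : Nat → Option Nat
  | 0 => none
  | k + 1 =>
    if PySem.Chars.isIn (PySem.List.slice sub (some (start : Int)) (some ((start + (k + 1) : Nat) : Int))) inp then
      some (start + (k + 1))
    else pvAScan inp sub start k

-- outer while loop; fuel ≥ len - start makes the recursion structural (start strictly increases)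
def pvALoop (inp sub : List Char) : Nat → Nat → List (List Char) → List (List Char)
  | _, 0, acc => acc
  | start, fuel + 1, acc =>
    if start < sub.length then
      match pvAScan inp sub start (sub.length - start) with
      | some e => pvALoop inp sub e fuel (acc ++ [PySem.List.slice sub (some (start : Int)) (some (e : Int))])
      | none   => pvALoop inp sub (start + 1) fuel acc
    else acc

def find_matching_parts (input_string : String) (substring : String) : List String :=
  (pvALoop input_string.toList substring.toList 0 substring.toList.length []).map String.ofList

-- ===== PORT B =====
-- pass 1 inner 'while e < n and substring[s:e+1] in input_string: e += 1' (fuel n - e)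
def pvExtend (inp sub : List Char) (s : Nat) : Nat → Nat → Nat
  | e, 0 => e
  | e, fuel + 1 =>
    if e < sub.length ∧ PySem.Chars.isIn (PySem.List.slice sub (some (s : Int)) (some ((e + 1 : Nat) : Int))) inp = true then
      pvExtend inp sub s (e + 1) fuel
    else e

-- pass 1: 'for s in range(n)' building L, carrying the right pointer e
def pvLens (inp sub : List Char) : List Nat :=
  ((List.range sub.length).foldl
    (fun (st : Nat × List Nat) s =>
      let e0 := if st.1 < s then s else st.1
      let e := pvExtend inp sub s e0 (sub.length - e0)
      (e, st.2 ++ [e - s]))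
    (0, [])).2

-- pass 2: 'while s < n' greedy walk over L (fuel ≥ n - s)
def pvEmit (sub : List Char) (L : List Nat) : Nat → Nat → List (List Char) → List (List Char)
  | _, 0, acc => acc
  | s, fuel + 1, acc =>
    if s < sub.length then
      if 0 < L.getD s 0 then
        pvEmit sub L (s + L.getD s 0) fuel
          (acc ++ [PySem.List.slice sub (some (s : Int)) (some ((s + L.getD s 0 : Nat) : Int))])
      else pvEmit sub L (s + 1) fuel acc
    else acc

def find_matching_parts_alt (input_string : String) (substring : String) : List String :=
  (pvEmit substring.toList (pvLens input_string.toList substring.toList) 0 substring.toList.length []).map String.ofList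

-- ===== PRECONDITION & SPEC =====
def Spec_find_matching_parts (input_string : String) (substring : String) (out : List String) : Prop := out = find_matching_parts_alt input_string substring
instance (input_string : String) (substring : String) (out : List String) : Decidable (Spec_find_matching_parts input_string substring out) := by unfold Spec_find_matching_parts; infer_instance

-- ===== CLAIM (what is proved, stated in full; the proofs are below) =====
def Claim_equal_find_matching_parts : Prop := ∀ (input_string : String) (substring : String), Dom_find_matching_parts input_string substring → Spec_find_matching_parts input_string substring (find_matching_parts input_string substring)

-- ===== LEMMAS AND PROOFS =====

-- 'substring[s:e] in input_string' as a proposition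
def pvQ (inp sub : List Char) (s e : Nat) : Prop :=
  PySem.Chars.isIn (PySem.List.slice sub (some (s : Int)) (some (e : Int))) inp = true

-- containment of a slice is prefix-closed in the right endpoint
theorem pvQ_mono (inp sub : List Char) (s : Nat) {e' e : Nat} (h : e' ≤ e)
    (hq : pvQ inp sub s e) : pvQ inp sub s e' := by
  unfold pvQ at *
  rw [PySem.List.slice_natCast] at *
  rw [PySem.Chars.isIn_iff_infix] at *
  refine List.IsPrefix.isInfix ?_ |>.trans hq
  have : (sub.drop s).take (e' - s) = ((sub.drop s).take (e - s)).take (e' - s) := by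
    rw [List.take_take, Nat.min_eq_left (by omega)]
  rw [this]
  exact List.take_prefix _ _

-- containment is closed under dropping the first character of the slice
theorem pvQ_drop (inp sub : List Char) (s e : Nat)
    (hq : pvQ inp sub s e) : pvQ inp sub (s + 1) e := by
  unfold pvQ at *
  rw [PySem.List.slice_natCast] at *
  rw [PySem.Chars.isIn_iff_infix] at *
  have h1 : (sub.drop (s + 1)).take (e - (s + 1)) = ((sub.drop s).take (e - s)).drop 1 := by
    rw [List.drop_take, List.drop_drop]
    congr 1
  rw [h1]
  exact (List.drop_suffix _ _).isInfix.trans hq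

-- characterization of the maximal extension endpoint from position s
def pvFChar (inp sub : List Char) (s r : Nat) : Prop :=
  s ≤ r ∧ r ≤ sub.length ∧ (∀ j, s < j → j ≤ r → pvQ inp sub s j) ∧
    (r = sub.length ∨ ¬ pvQ inp sub s (r + 1))

theorem pvFChar_unique (inp sub : List Char) (s : Nat) {r1 r2 : Nat}
    (h1 : pvFChar inp sub s r1) (h2 : pvFChar inp sub s r2) : r1 = r2 := by
  obtain ⟨a1, b1, c1, d1⟩ := h1
  obtain ⟨a2, b2, c2, d2⟩ := h2
  by_contra hne
  rcases Nat.lt_or_ge r1 r2 with h | h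
  · rcases d1 with h' | h'
    · omega
    · exact h' (pvQ_mono inp sub s (by omega) (c2 (r1 + 1) (by omega) (by omega)))
  · have hlt : r2 < r1 := by omega
    rcases d2 with h' | h'
    · omega
    · exact h' (pvQ_mono inp sub s (by omega) (c1 (r2 + 1) (by omega) (by omega)))

theorem pvExtend_spec (inp sub : List Char) (s : Nat) :
    ∀ fuel e, s ≤ e → e + fuel = sub.length →
      (∀ j, s < j → j ≤ e → pvQ inp sub s j) →
      pvFChar inp sub s (pvExtend inp sub s e fuel) := by
  intro fuel
  induction fuel with
  | zero =>
    intro e he hlen hall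
    simp only [pvExtend]
    exact ⟨he, by omega, hall, Or.inl (by omega)⟩
  | succ fuel ih =>
    intro e he hlen hall
    unfold pvExtend
    by_cases hc : e < sub.length ∧ PySem.Chars.isIn (PySem.List.slice sub (some (s : Int)) (some ((e + 1 : Nat) : Int))) inp = true
    · rw [if_pos hc]
      exact ih (e + 1) (by omega) (by omega) (by
        intro j hj1 hj2
        by_cases hje : j ≤ e
        · exact hall j hj1 hje
        · have : j = e + 1 := by omega
          subst this; exact hc.2)
    · rw [if_neg hc]
      refine ⟨he, by omega, hall, Or.inr ?_⟩
      intro hq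
      exact hc ⟨by omega, hq⟩

-- the canonical maximal endpoint
def pvF (inp sub : List Char) (s : Nat) : Nat :=
  pvExtend inp sub s s (sub.length - s)

theorem pvF_char (inp sub : List Char) (s : Nat) (hs : s ≤ sub.length) :
    pvFChar inp sub s (pvF inp sub s) :=
  pvExtend_spec inp sub s (sub.length - s) s (le_refl _) (by omega) (by omega)

-- pass-1 invariant: the fold over 'range k' yields the carried pointer and the length table
theorem pvLens_inv (inp sub : List Char) :
    ∀ k, k ≤ sub.length →
      (List.range k).foldl
        (fun (st : Nat × List Nat) s =>
          let e0 := if st.1 < s then s else st.1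
          let e := pvExtend inp sub s e0 (sub.length - e0)
          (e, st.2 ++ [e - s]))
        (0, []) =
      ((if k = 0 then 0 else pvF inp sub (k - 1)),
        (List.range k).map (fun s => pvF inp sub s - s)) := by
  intro k
  induction k with
  | zero => intro _; rfl
  | succ k ih =>
    intro hk
    rw [List.range_succ, List.foldl_append, ih (by omega)]
    simp only [List.foldl_cons, List.foldl_nil, List.map_append, List.map_cons, List.map_nil]
    have hstep : ∀ e0, k ≤ e0 → e0 ≤ sub.length →
        (∀ j, k < j → j ≤ e0 → pvQ inp sub k j) →
        pvExtend inp sub k e0 (sub.length - e0) = pvF inp sub k := by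
      intro e0 h1 h2 h3
      exact pvFChar_unique inp sub k
        (pvExtend_spec inp sub k (sub.length - e0) e0 h1 (by omega) h3)
        (pvF_char inp sub k (by omega))
    by_cases hk0 : k = 0
    · subst hk0
      simp only [reduceIte, Nat.lt_irrefl]
      rw [hstep 0 (le_refl _) (by omega) (by omega)]
      simp [pvF]
    · simp only [if_neg hk0, if_neg (Nat.succ_ne_zero k), Nat.add_sub_cancel]
      obtain ⟨a, b, c, d⟩ := pvF_char inp sub (k - 1) (by omega)
      by_cases hlt : pvF inp sub (k - 1) < k
      · simp only [if_pos hlt]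
        rw [hstep k (le_refl _) (by omega) (by omega)]
      · simp only [if_neg hlt]
        rw [hstep (pvF inp sub (k - 1)) (by omega) b (by
          intro j hj1 hj2
          have hq : pvQ inp sub (k - 1) j := c j (by omega) hj2
          have := pvQ_drop inp sub (k - 1) j hq
          rwa [show k - 1 + 1 = k by omega] at this)]

theorem pvLens_eq (inp sub : List Char) :
    pvLens inp sub = (List.range sub.length).map (fun s => pvF inp sub s - s) := by
  unfold pvLens
  rw [pvLens_inv inp sub sub.length (le_refl _)]

theorem pvLens_getD (inp sub : List Char) (s : Nat) (hs : s < sub.length) :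
    (pvLens inp sub).getD s 0 = pvF inp sub s - s := by
  rw [pvLens_eq]
  rw [List.getD_eq_getElem?_getD, List.getElem?_map, List.getElem?_range hs]
  rfl

-- A's downward scan computes exactly the canonical endpoint
theorem pvAScan_none (inp sub : List Char) (start : Nat) :
    ∀ k, (∀ j, 1 ≤ j → j ≤ k → ¬ pvQ inp sub start (start + j)) →
      pvAScan inp sub start k = none := by
  intro k
  induction k with
  | zero => intro _; rfl
  | succ k ih =>
    intro h
    unfold pvAScan
    simp only [pvQ] at h
    rw [if_neg (h (k + 1) (by omega) (by omega))]
    exact ih fun j h1 h2 => h j h1 (by omega)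

theorem pvAScan_some (inp sub : List Char) (start : Nat) :
    ∀ k j, 1 ≤ j → j ≤ k → pvQ inp sub start (start + j) →
      (∀ j', j < j' → j' ≤ k → ¬ pvQ inp sub start (start + j')) →
      pvAScan inp sub start k = some (start + j) := by
  intro k
  induction k with
  | zero => intro j h1 h2; omega
  | succ k ih =>
    intro j h1 h2 hq hmax
    unfold pvAScan
    simp only [pvQ] at hq hmax
    by_cases hj : j = k + 1
    · subst hj; rw [if_pos hq]
    · rw [if_neg (hmax (k + 1) (by omega) (by omega))]
      exact ih j h1 (by omega) hq fun j' a b => hmax j' a (by omega)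

theorem pvAScan_eq_F (inp sub : List Char) (s : Nat) (hs : s < sub.length) :
    pvAScan inp sub s (sub.length - s) =
      if pvF inp sub s = s then none else some (pvF inp sub s) := by
  obtain ⟨a, b, c, d⟩ := pvF_char inp sub s (by omega)
  by_cases he : pvF inp sub s = s
  · rw [if_pos he]
    apply pvAScan_none
    intro j hj1 hj2 hq
    have hq1 : pvQ inp sub s (s + 1) := pvQ_mono inp sub s (by omega) hq
    rcases d with h | h
    · omega
    · rw [he] at h; exact h hq1
  · rw [if_neg he]
    have hlt : s < pvF inp sub s := by omega
    have := pvAScan_some inp sub s (sub.length - s) (pvF inp sub s - s) (by omega) (by omega)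
      (by have := c (pvF inp sub s) (by omega) (le_refl _)
          rwa [show s + (pvF inp sub s - s) = pvF inp sub s by omega])
      (by
        intro j' hj1 hj2 hq
        rcases d with h | h
        · omega
        · exact h (pvQ_mono inp sub s (by omega) hq))
    rwa [show s + (pvF inp sub s - s) = pvF inp sub s by omega] at this

-- the two outer loops agree
theorem pvLoops_eq (inp sub : List Char) :
    ∀ fuel start acc, sub.length ≤ start + fuel →
      pvALoop inp sub start fuel acc = pvEmit sub (pvLens inp sub) start fuel acc := by
  intro fuel
  induction fuel with
  | zero => intro start acc h; rfl
  | succ fuel ih =>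
    intro start acc h
    unfold pvALoop pvEmit
    by_cases hs : start < sub.length
    · rw [if_pos hs, if_pos hs, pvAScan_eq_F inp sub start hs, pvLens_getD inp sub start hs]
      obtain ⟨a, b, c, d⟩ := pvF_char inp sub start (by omega)
      by_cases he : pvF inp sub start = start
      · rw [if_pos he, if_neg (by omega)]
        exact ih (start + 1) _ (by omega)
      · rw [if_neg he, if_pos (by omega)]
        rw [show start + (pvF inp sub start - start) = pvF inp sub start by omega]
        exact ih (pvF inp sub start) _ (by omega)
    · rw [if_neg hs, if_neg hs]

-- ===== VERDICT (by name: the statement is the Claim_ definition above) =====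
theorem find_matching_parts_spec : Claim_equal_find_matching_parts := by
  intro input_string substring _
  unfold Spec_find_matching_parts find_matching_parts find_matching_parts_alt
  rw [pvLoops_eq input_string.toList substring.toList substring.toList.length 0 [] (by omega)]
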